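-- pv_equiv track=rewrite | github.com/MatthewNewell006/python_examples | src/coding_challenges/coding_challenges_part_1_1.py | remove_odd_values
-- ===== SOURCE A (Python) =====
-- def remove_odd_values(dictionary):
--     removal_list = []
--     for key in dictionary:
--         if isinstance(dictionary[key], int):
--             if dictionary[key] % 2 == 1:
--                 removal_list.append(key)
--
--     for key in removal_list:
--         dictionary.pop(key)
--
--     return dictionary
-- ===== SOURCE B (Python) =====
-- def remove_odd_values(dictionary):
--     # Build the dict of entries to KEEP (everything that is not an odd int),
--     # then mutate the original in place: clear it and re-insert the survivors.
--     keep = {k: v for k, v in dictionary.items()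
--             if not (isinstance(v, int) and v % 2 == 1)}
--     dictionary.clear()
--     dictionary.update(keep)
--     return dictionary
-- ===== Notes on version B (the rewrite author's own statement) =====
-- stated objective: simpler
-- what changed: Instead of collecting the keys of odd values in a list and then popping them one by one, B keeps the complement (a dict comprehension of the surviving entries) and rebuilds the dictionary in place with clear()+update(), one pass over the items and no key re-lookups.
import Mathlib
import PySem

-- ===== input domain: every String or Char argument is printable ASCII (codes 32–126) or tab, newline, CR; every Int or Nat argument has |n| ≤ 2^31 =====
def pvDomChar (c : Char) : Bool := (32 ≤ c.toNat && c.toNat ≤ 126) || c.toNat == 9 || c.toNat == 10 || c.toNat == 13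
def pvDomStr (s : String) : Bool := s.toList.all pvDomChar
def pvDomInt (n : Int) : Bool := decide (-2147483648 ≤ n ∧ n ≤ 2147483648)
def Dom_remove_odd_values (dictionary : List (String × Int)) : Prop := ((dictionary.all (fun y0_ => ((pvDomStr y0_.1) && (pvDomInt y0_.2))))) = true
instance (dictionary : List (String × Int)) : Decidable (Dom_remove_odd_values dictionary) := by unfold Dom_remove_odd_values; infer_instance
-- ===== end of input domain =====

-- B removes odd values by keeping the complement and rebuilding (clear+update)
-- instead of collecting keys and popping them; same return value, simpler shape.
-- Both A and B mutate the dict argument in place and return it; the ports model the return value.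

-- ===== PORT A =====
-- removal_list = []; for key in dictionary: (dictionary[key] is an int here, so the
-- isinstance check is always true) if dictionary[key] % 2 == 1: removal_list.append(key);
-- then: for key in removal_list: dictionary.pop(key); return dictionary
def remove_odd_values (dictionary : List (String × Int)) : List (String × Int) :=
  let removal_list : List String := dictionary.foldl (fun acc kv =>
    match (PySem.Dict.mk dictionary).get? kv.1 with
    | some v => if PySem.Int.mod v 2 == 1 then acc ++ [kv.1] else acc
    | none => acc) []
  (removal_list.foldl (fun d key => d.erase key) (PySem.Dict.mk dictionary)).items

-- ===== PORT B =====
-- keep = {k: v for k, v in dictionary.items() if not (v % 2 == 1)};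
-- dictionary.clear(); dictionary.update(keep); return dictionary
def remove_odd_values_alt (dictionary : List (String × Int)) : List (String × Int) :=
  let keep : List (String × Int) := dictionary.filter (fun kv => !(PySem.Int.mod kv.2 2 == 1))
  ((PySem.Dict.empty : PySem.Dict String Int).update keep).items

-- ===== PRECONDITION & SPEC =====
-- Pre_ excludes association lists with duplicate keys: they do not represent any Python
-- dict (a dict argument cannot contain two entries with the same key).
def Pre_remove_odd_values (dictionary : List (String × Int)) : Prop :=
  (dictionary.map Prod.fst).Nodup
instance (dictionary : List (String × Int)) : Decidable (Pre_remove_odd_values dictionary) := by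
  unfold Pre_remove_odd_values; infer_instance
def pvWitness_remove_odd_values : (List (String × Int)) := [("a", 2), ("b", 3)]

def Spec_remove_odd_values (dictionary : List (String × Int)) (out : List (String × Int)) : Prop := out = remove_odd_values_alt dictionary
instance (dictionary : List (String × Int)) (out : List (String × Int)) : Decidable (Spec_remove_odd_values dictionary out) := by unfold Spec_remove_odd_values; infer_instance

-- ===== CLAIM (what is proved, stated in full; the proofs are below) =====
def Claim_equal_remove_odd_values : Prop := ∀ (dictionary : List (String × Int)), Dom_remove_odd_values dictionary → Pre_remove_odd_values dictionary → Spec_remove_odd_values dictionary (remove_odd_values dictionary)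

-- ===== LEMMAS AND PROOFS =====

theorem erase_foldl_items (R : List String) (dd : PySem.Dict String Int) :
    (R.foldl (fun d key => d.erase key) dd).items
      = dd.items.filter (fun p => !(R.contains p.1)) := by
  induction R generalizing dd with
  | nil => simp
  | cons k R ih =>
    rw [List.foldl_cons, ih]
    show ((PySem.Dict.erase dd k).items).filter _ = _
    simp only [PySem.Dict.erase, List.filter_filter]
    apply List.filter_congr
    intro p _
    by_cases h : p.1 = k <;> simp [h]

theorem pair_eq_of_nodup_keys {d : List (String × Int)} {p q : String × Int}
    (hnd : (d.map Prod.fst).Nodup) (hp : p ∈ d) (hq : q ∈ d) (h : p.1 = q.1) : p = q := by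
  induction d with
  | nil => cases hp
  | cons x t ih =>
    simp only [List.map_cons, List.nodup_cons] at hnd
    rcases List.mem_cons.1 hp with rfl | hp' <;> rcases List.mem_cons.1 hq with rfl | hq'
    · rfl
    · exact absurd (h ▸ List.mem_map_of_mem (f := Prod.fst) hq') hnd.1
    · exact absurd (h ▸ List.mem_map_of_mem (f := Prod.fst) hp') hnd.1
    · exact ih hnd.2 hp' hq'

-- ===== VERDICT (by name: the statement is the Claim_ definition above) =====
theorem remove_odd_values_spec : Claim_equal_remove_odd_values := by
  intro d _ hnd
  unfold Spec_remove_odd_values remove_odd_values remove_odd_values_alt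
  have hkeys : (PySem.Dict.mk d).keys.Nodup := hnd
  -- the lookup dictionary[key] inside the loop returns the value paired with the key
  have h1 : d.foldl (fun acc kv =>
        match (PySem.Dict.mk d).get? kv.1 with
        | some v => if PySem.Int.mod v 2 == 1 then acc ++ [kv.1] else acc
        | none => acc) []
      = d.foldl (fun acc kv =>
          if (fun kv : String × Int => PySem.Int.mod kv.2 2 == 1) kv = true
          then acc ++ [(fun kv : String × Int => kv.1) kv] else acc) [] := by
    apply PySem.List.foldl_congr_mem
    intro acc kv hkv
    rw [PySem.Dict.get?_of_mem_items (PySem.Dict.mk d) hkv hkeys]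
  rw [h1, PySem.List.foldl_append_if, List.nil_append, erase_foldl_items]
  show _ = ((PySem.Dict.empty : PySem.Dict String Int).update
      (d.filter (fun kv => !(PySem.Int.mod kv.2 2 == 1)))).items
  rw [PySem.Dict.update, PySem.Dict.items_foldl_insert_fresh]
  · simp only [PySem.Dict.empty, List.nil_append, Prod.mk.eta, List.map_id']
    apply List.filter_congr
    intro p hp
    congr 1
    rw [List.contains_eq_mem]
    by_cases hodd : (PySem.Int.mod p.2 2 == 1) = true
    · rw [hodd, decide_eq_true_eq]
      exact List.mem_map.2 ⟨p, List.mem_filter.2 ⟨hp, hodd⟩, rfl⟩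
    · rw [Bool.not_eq_true] at hodd
      rw [hodd, decide_eq_false_iff_not]
      intro hmem
      rcases List.mem_map.1 hmem with ⟨q, hq, hkey⟩
      rcases List.mem_filter.1 hq with ⟨hqd, hqodd⟩
      have hqp := pair_eq_of_nodup_keys hnd hqd hp hkey
      rw [hqp, hodd] at hqodd
      exact Bool.false_ne_true hqodd
  · intro a _; rfl
  · have hsub : (d.filter (fun kv => !(PySem.Int.mod kv.2 2 == 1))).Sublist d :=
      List.filter_sublist
    exact hnd.sublist (hsub.map Prod.fst)
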